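-- pv_equiv track=rewrite | github.com/Ravi-0412/DSA-Program-And-Notes | Queue/FInd Winner in KnockOut Tournament.py | is_valid_draw_inplace
-- ===== SOURCE A (Python) =====
-- def is_valid_draw_inplace(nums):
--     n = len(nums)
--
--     # Power of 2 check: Tournament brackets must be 2, 4, 8, 16...
--     if n < 1 or (n & (n - 1)) != 0:
--         return False
--
--     # current_size represents how many players are still "active" in the array
--     current_size = n
--
--     while current_size > 1:
--         # In a valid draw, the sum of paired opponents is always (Min + Max + 1)
--         # For a standard 1-N tournament, this is (current_size + 1)
--         target_sum = current_size + 1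
--
--         # We only need to iterate through half of the 'active' size to make matches
--         for i in range(current_size // 2):
--             # Index of the two players currently playing
--             idx1 = i * 2
--             idx2 = idx1 + 1
--
--             p1 = nums[idx1]
--             p2 = nums[idx2]
--
--             # 1. Validation: Check the "Best vs Worst" invariant
--             if p1 + p2 != target_sum:
--                 return False
--
--             # 2. Promotion: Move the winner to the 'next round' section of the array
--             # We overwrite nums[i] because i will always be <= idx1
--             nums[i] = min(p1, p2)
--
--         # 3. Update active size: The number of players is halved every round
--         current_size //= 2
--
--     return True
-- ===== SOURCE B (Python) =====
-- # B: pure recursive round validator (builds pair/winner lists per round) instead of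
-- # A's in-place index loop; return-value equivalent — unlike A, B does NOT mutate nums.
--
-- def _pairs(l):
--     pairs = []
--     i = 0
--     while i + 1 < len(l):
--         pairs.append((l[i], l[i + 1]))
--         i += 2
--     return pairs
--
-- def _valid(l):
--     if len(l) <= 1:
--         return True
--     ps = _pairs(l)
--     if any(a + b != len(l) + 1 for a, b in ps):
--         return False
--     return _valid([min(a, b) for a, b in ps])
--
-- def is_valid_draw_inplace(nums):
--     n = len(nums)
--     if n < 1 or (n & (n - 1)) != 0:
--         return False
--     return _valid(nums)
-- ===== Notes on version B (the rewrite author's own statement) =====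
-- stated objective: alternative
-- what changed: Replaces A's in-place index-mutating while/for loops (overwriting nums[i] with winners and halving an active-size counter) with a pure recursion that builds an explicit pair list and a fresh winners list per round; B does not mutate nums (return-value equivalent).
import Mathlib
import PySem

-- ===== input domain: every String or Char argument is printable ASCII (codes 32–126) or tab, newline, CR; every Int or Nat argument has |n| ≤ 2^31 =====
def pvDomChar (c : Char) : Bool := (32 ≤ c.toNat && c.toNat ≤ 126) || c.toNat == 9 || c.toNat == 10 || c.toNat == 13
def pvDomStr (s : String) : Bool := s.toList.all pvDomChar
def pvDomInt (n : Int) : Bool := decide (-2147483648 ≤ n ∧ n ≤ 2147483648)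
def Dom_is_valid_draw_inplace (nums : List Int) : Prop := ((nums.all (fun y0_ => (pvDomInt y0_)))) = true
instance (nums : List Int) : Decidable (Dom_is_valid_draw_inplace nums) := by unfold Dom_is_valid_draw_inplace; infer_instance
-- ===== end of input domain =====

-- B validates each round as a pure recursion (pair list + new winners list) instead of
-- A's in-place index loop; equivalence is about the RETURN value only (A mutates nums, B does not).


-- ===== PORT A =====
-- inner 'for i in range(cs // 2)' loop; idx1 = 2*i and idx2 = 2*i+1 are nonnegative and
-- < current_size ≤ len(nums), so 'getD _ 0' is exact where Python indexes.
def innerA (nums : List Int) (cs i : Nat) : Option (List Int) :=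
  if i < cs / 2 then
    let p1 := nums.getD (2 * i) 0
    let p2 := nums.getD (2 * i + 1) 0
    if p1 + p2 ≠ (cs : Int) + 1 then none
    else innerA (nums.set i (min p1 p2)) cs (i + 1)
  else some nums
termination_by cs / 2 - i

-- outer 'while current_size > 1' loop
def loopA (nums : List Int) (cs : Nat) : Bool :=
  if cs > 1 then
    match innerA nums cs 0 with
    | none => false
    | some ns => loopA ns (cs / 2)
  else true
termination_by cs
decreasing_by exact Nat.div_lt_self (by omega) (by omega)

def is_valid_draw_inplace (nums : List Int) : Bool :=
  let n := nums.length
  if n < 1 || (n &&& (n - 1)) != 0 then false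
  else loopA nums n

-- ===== PORT B =====
-- _pairs: 'while i + 1 < len(l)' collecting (l[i], l[i+1]); indices are in range, so getD is exact
def pairsGo (l : List Int) (i : Nat) (acc : List (Int × Int)) : List (Int × Int) :=
  if i + 1 < l.length then pairsGo l (i + 2) (acc ++ [(l.getD i 0, l.getD (i + 1) 0)])
  else acc
termination_by l.length - i

def pairsB (l : List Int) : List (Int × Int) := pairsGo l 0 []

-- termination fact for _valid's recursion (each round halves the list)
theorem pairsGo_length (l : List Int) : ∀ i acc, (pairsGo l i acc).length = acc.length + (l.length - i) / 2 := by
  intro i acc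
  fun_induction pairsGo l i acc with
  | case1 i acc h ih =>
      rw [ih]; simp; omega
  | case2 i acc h =>
      omega

def validB (l : List Int) : Bool :=
  if l.length ≤ 1 then true
  else
    let ps := pairsB l
    if ps.any (fun p => p.1 + p.2 ≠ (l.length : Int) + 1) then false
    else validB (ps.map (fun p => min p.1 p.2))
termination_by l.length
decreasing_by
  simp only [List.length_map, pairsB, pairsGo_length]
  simp
  omega

def is_valid_draw_inplace_alt (nums : List Int) : Bool :=
  let n := nums.length
  if n < 1 || (n &&& (n - 1)) != 0 then false
  else validB nums

-- ===== PRECONDITION & SPEC =====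
def Spec_is_valid_draw_inplace (nums : List Int) (out : Bool) : Prop := out = is_valid_draw_inplace_alt nums
instance (nums : List Int) (out : Bool) : Decidable (Spec_is_valid_draw_inplace nums out) := by unfold Spec_is_valid_draw_inplace; infer_instance

-- ===== CLAIM (what is proved, stated in full; the proofs are below) =====
def Claim_equal_is_valid_draw_inplace : Prop := ∀ (nums : List Int), Dom_is_valid_draw_inplace nums → Spec_is_valid_draw_inplace nums (is_valid_draw_inplace nums)

-- ===== LEMMAS AND PROOFS =====

-- structural pairing function: the shape the proofs recurse on
def pairsRec : List Int → List (Int × Int)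
  | a :: b :: t => (a, b) :: pairsRec t
  | _ => []

theorem pairsRec_short (l : List Int) (h : l.length ≤ 1) : pairsRec l = [] := by
  match l with
  | [] => rfl
  | [a] => rfl
  | a :: b :: t => simp at h

theorem pairsRec_length (l : List Int) : (pairsRec l).length = l.length / 2 := by
  fun_induction pairsRec l with
  | case1 a b t ih => simp [ih]; omega
  | case2 l h =>
      have hl : l.length ≤ 1 := by
        cases l with
        | nil => simp
        | cons a t =>
          cases t with
          | nil => simp
          | cons b t' => exact absurd rfl (fun he => h a b t' he)
      simp; omega

theorem set_take_succ (l : List Int) (i : Nat) (a : Int) (h : i < l.length) :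
    (l.set i a).take (i + 1) = l.take i ++ [a] := by
  rw [List.set_eq_take_cons_drop a h, List.take_append]
  simp [List.length_take, Nat.min_eq_left (Nat.le_of_lt h)]

theorem pairsGo_eq (l : List Int) : ∀ i acc, pairsGo l i acc = acc ++ pairsRec (l.drop i) := by
  intro i acc
  fun_induction pairsGo l i acc with
  | case1 i acc h ih =>
      rw [ih, List.drop_eq_getElem_cons (show i < l.length by omega),
          List.drop_eq_getElem_cons (show i + 1 < l.length by omega)]
      simp [pairsRec, h, show i < l.length by omega]
  | case2 i acc h =>
      rw [pairsRec_short _ (by simp; omega)]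
      simp

theorem pairsB_eq (l : List Int) : pairsB l = pairsRec l := by
  simpa using pairsGo_eq l 0 []

theorem innerA_go (cs : Nat) : ∀ k i nums, i + k = cs / 2 → cs ≤ nums.length →
    innerA nums cs i =
      (if ((pairsRec ((nums.drop (2 * i)).take (2 * k))).any
            (fun p => p.1 + p.2 ≠ (cs : Int) + 1)) then none
       else some (nums.take i
              ++ (pairsRec ((nums.drop (2 * i)).take (2 * k))).map (fun p => min p.1 p.2)
              ++ nums.drop (i + k))) := by
  intro k
  induction k with
  | zero =>
      intro i nums hik hlen
      rw [innerA]
      simp [pairsRec, show ¬ i < cs / 2 by omega]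
  | succ k ih =>
      intro i nums hik hlen
      have hi : i < cs / 2 := by omega
      have h2 : 2 * i + 1 < nums.length := by
        have := Nat.div_mul_le_self cs 2
        omega
      have h1 : 2 * i < nums.length := by omega
      have hseg : (nums.drop (2 * i)).take (2 * (k + 1)) =
          nums[2 * i] :: nums[2 * i + 1] :: (nums.drop (2 * (i + 1))).take (2 * k) := by
        rw [List.drop_eq_getElem_cons h1, List.drop_eq_getElem_cons (show 2 * i + 1 < nums.length by omega)]
        have : 2 * (k + 1) = (2 * k + 1) + 1 := by omega
        rw [this, List.take_succ_cons, List.take_succ_cons]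
        have : 2 * i + 1 + 1 = 2 * (i + 1) := by omega
        rw [this]
      rw [innerA, if_pos hi]
      rw [List.getD_eq_getElem nums 0 h1, List.getD_eq_getElem nums 0 h2, hseg]
      by_cases hbad : nums[2 * i] + nums[2 * i + 1] = (cs : Int) + 1
      · rw [if_neg (show ¬ (nums[2 * i] + nums[2 * i + 1] ≠ (cs : Int) + 1) from by simp [hbad])]
        have hset : i < nums.length := by
          have := Nat.div_le_self cs 2
          omega
        rw [ih (i + 1) (nums.set i (min nums[2 * i] nums[2 * i + 1]))
           (by omega) (by simpa using hlen)]
        rw [List.drop_set_of_lt (show i < 2 * (i + 1) by omega)]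
        rw [set_take_succ _ _ _ hset]
        rw [List.drop_set_of_lt (show i < i + 1 + k by omega)]
        simp only [pairsRec, List.any_cons, List.map_cons]
        rw [show (i + 1 + k) = i + (k + 1) from by omega]
        have hfalse : (decide (nums[2 * i] + nums[2 * i + 1] ≠ (cs : Int) + 1)) = false := by
          simp [hbad]
        rw [hfalse, Bool.false_or]
        simp [List.append_assoc]
      · rw [if_pos (show nums[2 * i] + nums[2 * i + 1] ≠ (cs : Int) + 1 from hbad)]
        simp only [pairsRec, List.any_cons]
        rw [if_pos (by simp [hbad])]

theorem pairsRec_take (l : List Int) : ∀ m, pairsRec (l.take (2 * (m / 2))) = pairsRec (l.take m) := by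
  fun_induction pairsRec l with
  | case1 a b t ih =>
      intro m
      match m with
      | 0 => rfl
      | 1 => simp [pairsRec]
      | (m + 2) =>
          have h2 : 2 * ((m + 2) / 2) = 2 * (m / 2) + 2 := by omega
          rw [h2]
          simp only [List.take_succ_cons, pairsRec]
          rw [ih m]
  | case2 l h =>
      intro m
      have hlen : l.length ≤ 1 := by
        cases l with
        | nil => simp
        | cons a t =>
          cases t with
          | nil => simp
          | cons b t' => exact absurd rfl (fun he => h a b t' he)
      rw [pairsRec_short _ (by simp; omega), pairsRec_short _ (by simp; omega)]

theorem main_loop : ∀ (cs : Nat) (nums : List Int), cs ≤ nums.length → loopA nums cs = validB (nums.take cs) := by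
  intro cs
  induction cs using Nat.strong_induction_on with
  | _ cs ih =>
    intro nums hle
    by_cases h1 : cs > 1
    · have h22 : 2 * (cs / 2) ≤ cs := by omega
      have htl : (nums.take cs).length = cs := by rw [List.length_take]; omega
      have hpairs : pairsRec (nums.take (2 * (cs / 2))) = pairsB (nums.take cs) := by
        rw [pairsB_eq]
        have h := pairsRec_take (nums.take cs) cs
        rw [List.take_take, List.take_take, Nat.min_self, Nat.min_eq_left h22] at h
        exact h
      rw [loopA, if_pos h1]
      rw [innerA_go cs (cs / 2) 0 nums (by omega) hle]
      rw [validB, if_neg (show ¬ (nums.take cs).length ≤ 1 by rw [htl]; omega)]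
      simp only [htl, show (2 : Nat) * 0 = 0 from rfl, List.drop_zero, List.take_zero,
                 List.nil_append, Nat.zero_add, hpairs]
      by_cases hany : ((pairsB (nums.take cs)).any fun p => decide (p.1 + p.2 ≠ (cs : Int) + 1)) = true
      · rw [if_pos hany, if_pos hany]
      · rw [if_neg hany, if_neg hany]
        split
        case _ heq => simp at heq
        case _ ns heq =>
        obtain rfl : ns = (pairsB (nums.take cs)).map (fun p => min p.1 p.2) ++ nums.drop (cs / 2) := by
          injection heq with heq'
          exact heq'.symm
        have hms : ((pairsB (nums.take cs)).map (fun p => min p.1 p.2)).length = cs / 2 := by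
          rw [List.length_map, pairsB_eq, pairsRec_length, htl]
        rw [ih (cs / 2) (Nat.div_lt_self (by omega) (by omega)) _
            (by rw [List.length_append, hms]; omega)]
        congr 1
        rw [show cs / 2 = ((pairsB (nums.take cs)).map (fun p => min p.1 p.2)).length from hms.symm,
            List.take_left]
    · rw [loopA, if_neg h1, validB, if_pos (by rw [List.length_take]; omega)]

-- ===== VERDICT (by name: the statement is the Claim_ definition above) =====
theorem is_valid_draw_inplace_spec : Claim_equal_is_valid_draw_inplace := by
  intro nums _
  have h : loopA nums nums.length = validB nums := by
    simpa using main_loop nums.length nums (le_refl _)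
  unfold Spec_is_valid_draw_inplace
  simp [is_valid_draw_inplace, is_valid_draw_inplace_alt, h]
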